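-- pv_equiv track=rewrite | github.com/Anrew3/Reclio | app/services/feed_builder.py | _top_genre_ids
-- ===== SOURCE A (Python) =====
-- def _top_genre_ids(scores: dict | None, k: int = 3, exclude: set[int] | None = None) -> list[int]:
--     if not scores:
--         return []
--     ordered = sorted(scores.items(), key=lambda x: x[1], reverse=True)
--     out: list[int] = []
--     for gid, _score in ordered:
--         try:
--             gid_int = int(gid)
--         except (TypeError, ValueError):
--             continue
--         if exclude and gid_int in exclude:
--             continue
--         out.append(gid_int)
--         if len(out) >= k:
--             break
--     return out
-- ===== SOURCE B (Python) =====
-- def _top_genre_ids(scores: dict | None, k: int = 3, exclude: set[int] | None = None) -> list[int]: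
--     # One pass with a bounded best-list of size k (no full sort of all items).
--     if not scores:
--         return []
--     best = []  # up to k (score, gid) pairs, best score first; ties keep arrival order
--     for gid, score in scores.items():
--         try:
--             g = int(gid)
--         except (TypeError, ValueError):
--             continue
--         if exclude and g in exclude:
--             continue
--         i = 0
--         while i < len(best) and best[i][0] >= score:
--             i += 1
--         best.insert(i, (score, g))
--         if len(best) > k:
--             best.pop()
--     return [g for _, g in best]
-- ===== Notes on version B (the rewrite author's own statement) =====
-- stated objective: alternative
-- what changed: B replaces A's full descending sort followed by a break-at-k scan with a single pass that maintains a bounded, ordered best-k list (insert in order, drop the worst when it exceeds k).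
-- intended difference: When k <= 0 and scores is truthy with at least one parsable, non-excluded id, A returns a one-element list with the best such id because its 'len(out) >= k' break only fires after the first append, while B returns the empty list, the intended result for a non-positive k. — e.g. on _top_genre_ids(some [("7", 1)], 0, none): A returns [7], B returns []
import Mathlib
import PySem

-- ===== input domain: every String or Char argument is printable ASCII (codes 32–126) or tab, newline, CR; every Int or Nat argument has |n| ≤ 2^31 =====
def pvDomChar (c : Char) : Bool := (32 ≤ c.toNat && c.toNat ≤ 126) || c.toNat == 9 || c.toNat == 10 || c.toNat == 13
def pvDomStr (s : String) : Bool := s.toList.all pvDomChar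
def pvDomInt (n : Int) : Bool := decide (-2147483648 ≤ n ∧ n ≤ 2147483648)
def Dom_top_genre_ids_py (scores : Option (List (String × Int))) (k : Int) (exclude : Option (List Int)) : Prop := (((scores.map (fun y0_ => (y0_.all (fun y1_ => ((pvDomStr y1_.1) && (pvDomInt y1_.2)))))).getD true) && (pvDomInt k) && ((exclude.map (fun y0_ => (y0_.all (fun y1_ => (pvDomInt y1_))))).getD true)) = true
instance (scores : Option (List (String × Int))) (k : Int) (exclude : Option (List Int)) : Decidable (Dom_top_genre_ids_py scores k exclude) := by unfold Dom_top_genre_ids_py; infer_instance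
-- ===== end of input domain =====

-- B replaces A's full descending sort + break-at-k scan by a single pass that keeps a
-- bounded, ordered best-k list (objective: alternative; return value only, no mutation).

-- ===== PORT A =====
-- `exclude and gid_int in exclude` (falsy None/empty set short-circuits)
def pvExcludedTGI (exclude : Option (List Int)) (g : Int) : Bool :=
  match exclude with
  | none => false
  | some l => !l.isEmpty && l.contains g

-- A's for-loop over the sorted items, with the `len(out) >= k` break
def goTGI (k : Int) (exclude : Option (List Int)) : List (String × Int) → List Int → List Int
  | [], out => out
  | (gid, _score) :: rest, out =>
    match PySem.Int.ofStr? gid with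
    | none => goTGI k exclude rest out
    | some g =>
      if pvExcludedTGI exclude g then goTGI k exclude rest out
      else
        let out' := out ++ [g]
        if k ≤ (out'.length : Int) then out' else goTGI k exclude rest out'

def top_genre_ids_py (scores : Option (List (String × Int))) (k : Int) (exclude : Option (List Int)) : List Int :=
  match scores with
  | none => []
  | some s =>
    if s.isEmpty then []
    else goTGI k exclude (PySem.List.sorted s (fun x => x.2) true) []

-- ===== PORT B =====
-- B's while-scan + list.insert: insert (score, gid) after all kept pairs with score ≥ its own
def bInsertTGI (x : Int × Int) : List (Int × Int) → List (Int × Int)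
  | [] => [x]
  | y :: ys => if y.1 ≥ x.1 then y :: bInsertTGI x ys else x :: y :: ys

-- B's loop body: parse, filter, bounded insert, pop the worst when len(best) > k
def bStepTGI (k : Int) (exclude : Option (List Int)) (best : List (Int × Int)) (item : String × Int) : List (Int × Int) :=
  match PySem.Int.ofStr? item.1 with
  | none => best
  | some g =>
    if pvExcludedTGI exclude g then best
    else
      let t := bInsertTGI (item.2, g) best
      if k < (t.length : Int) then t.dropLast else t

def top_genre_ids_py_alt (scores : Option (List (String × Int))) (k : Int) (exclude : Option (List Int)) : List Int :=
  match scores with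
  | none => []
  | some s =>
    if s.isEmpty then []
    else (s.foldl (bStepTGI k exclude) []).map (fun p => p.2)

-- ===== PRECONDITION & SPEC =====
-- When k ≤ 0 and scores is truthy with at least one parsable non-excluded id, A returns the
-- single best such id (its `len(out) >= k` break fires only after the first append), while B
-- returns the empty list, the intended result for a non-positive k.
def D_top_genre_ids_py (scores : Option (List (String × Int))) (k : Int) (exclude : Option (List Int)) : Prop :=
  k ≤ 0 ∧ scores.getD [] ≠ [] ∧
    ((scores.getD []).any (fun x =>
      match PySem.Int.ofStr? x.1 with
      | none => false
      | some g => !((exclude.getD []).contains g))) = true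
instance (scores : Option (List (String × Int))) (k : Int) (exclude : Option (List Int)) : Decidable (D_top_genre_ids_py scores k exclude) := by unfold D_top_genre_ids_py; infer_instance

def Spec_top_genre_ids_py (scores : Option (List (String × Int))) (k : Int) (exclude : Option (List Int)) (out : List Int) : Prop := ¬ D_top_genre_ids_py scores k exclude → out = top_genre_ids_py_alt scores k exclude
instance (scores : Option (List (String × Int))) (k : Int) (exclude : Option (List Int)) (out : List Int) : Decidable (Spec_top_genre_ids_py scores k exclude out) := by unfold Spec_top_genre_ids_py; infer_instance

def pvDiffWitness_top_genre_ids_py : (Option (List (String × Int))) × Int × Option (List Int) :=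
  (some [("7", 1)], 0, none)
def pvDiffWitnessOut_top_genre_ids_py : (List Int) × (List Int) := ([7], [])

-- ===== CLAIM (what is proved, stated in full; the proofs are below) =====
def Claim_unchanged_top_genre_ids_py : Prop := ∀ (scores : Option (List (String × Int))) (k : Int) (exclude : Option (List Int)), Dom_top_genre_ids_py scores k exclude → Spec_top_genre_ids_py scores k exclude (top_genre_ids_py scores k exclude)
def Claim_changed_top_genre_ids_py : Prop := Dom_top_genre_ids_py (pvDiffWitness_top_genre_ids_py.1) (pvDiffWitness_top_genre_ids_py.2.1) (pvDiffWitness_top_genre_ids_py.2.2) ∧ D_top_genre_ids_py (pvDiffWitness_top_genre_ids_py.1) (pvDiffWitness_top_genre_ids_py.2.1) (pvDiffWitness_top_genre_ids_py.2.2) ∧ top_genre_ids_py (pvDiffWitness_top_genre_ids_py.1) (pvDiffWitness_top_genre_ids_py.2.1) (pvDiffWitness_top_genre_ids_py.2.2) = pvDiffWitnessOut_top_genre_ids_py.1 ∧ top_genre_ids_py_alt (pvDiffWitness_top_genre_ids_py.1) (pvDiffWitness_top_genre_ids_py.2.1) (pvDiffWitness_top_genre_ids_py.2.2) = pvDiffWitnessOut_top_genre_ids_py.2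 ∧ pvDiffWitnessOut_top_genre_ids_py.1 ≠ pvDiffWitnessOut_top_genre_ids_py.2
def Claim_exact_top_genre_ids_py : Prop := ∀ (scores : Option (List (String × Int))) (k : Int) (exclude : Option (List Int)), Dom_top_genre_ids_py scores k exclude → D_top_genre_ids_py scores k exclude → top_genre_ids_py scores k exclude ≠ top_genre_ids_py_alt scores k exclude

-- ===== LEMMAS AND PROOFS =====

-- proof-only abbreviations
def fATGI (ex : Option (List Int)) (x : String × Int) : Option Int :=
  match PySem.Int.ofStr? x.1 with
  | none => none
  | some g => if pvExcludedTGI ex g then none else some g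

def fBTGI (ex : Option (List Int)) (x : String × Int) : Option (Int × Int) :=
  match PySem.Int.ofStr? x.1 with
  | none => none
  | some g => if pvExcludedTGI ex g then none else some (x.2, g)

def stepPTGI (k : Int) (best : List (Int × Int)) (p : Int × Int) : List (Int × Int) :=
  let t := PySem.List.insertBy (fun a b => decide (b.1 < a.1)) p best
  if k < (t.length : Int) then t.dropLast else t

theorem insertBy_nil {α : Type} (b : α → α → Bool) (x : α) :
    PySem.List.insertBy b x [] = [x] := rfl

theorem insertBy_cons {α : Type} (b : α → α → Bool) (x y : α) (ys : List α) :
    PySem.List.insertBy b x (y :: ys) =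
      if b x y then x :: y :: ys else y :: PySem.List.insertBy b x ys := rfl

theorem length_insertBy {α : Type} (b : α → α → Bool) (x : α) (l : List α) :
    (PySem.List.insertBy b x l).length = l.length + 1 := by
  induction l with
  | nil => rfl
  | cons y ys ih =>
    rw [insertBy_cons]
    split <;> simp [ih]

theorem bInsert_eq (x : Int × Int) (l : List (Int × Int)) :
    bInsertTGI x l = PySem.List.insertBy (fun a b : Int × Int => decide (b.1 < a.1)) x l := by
  induction l with
  | nil => rfl
  | cons y ys ih =>
    rw [insertBy_cons]
    simp only [bInsertTGI, ih]
    by_cases h : y.1 ≥ x.1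
    · simp [h, show ¬ (y.1 < x.1) by omega]
    · simp [h, show y.1 < x.1 by omega]

theorem foldl_bStep (k : Int) (ex : Option (List Int)) (s : List (String × Int)) :
    ∀ acc, s.foldl (bStepTGI k ex) acc = (s.filterMap (fBTGI ex)).foldl (stepPTGI k) acc := by
  induction s with
  | nil => intro acc; rfl
  | cons x xs ih =>
    intro acc
    simp only [List.foldl_cons, List.filterMap_cons]
    have hstep : bStepTGI k ex acc x =
        match fBTGI ex x with
        | none => acc
        | some p => stepPTGI k acc p := by
      unfold bStepTGI fBTGI stepPTGI
      cases PySem.Int.ofStr? x.1 with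
      | none => rfl
      | some g =>
        by_cases h : pvExcludedTGI ex g = true
        · simp [h]
        · simp [h, bInsert_eq]
    cases hfb : fBTGI ex x with
    | none => rw [hstep, hfb]; exact ih acc
    | some p => rw [hstep, hfb]; simp only [List.foldl_cons]; exact ih _

theorem take_insertBy {α : Type} (b : α → α → Bool) (x : α) :
    ∀ (S : List α) (K : Nat),
      (PySem.List.insertBy b x S).take K = (PySem.List.insertBy b x (S.take K)).take K := by
  intro S
  induction S with
  | nil => intro K; simp
  | cons y ys ih =>
    intro K
    cases K with
    | zero => simp
    | succ j =>
      rw [insertBy_cons, List.take_succ_cons, insertBy_cons]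
      by_cases h : b x y = true
      · simp only [h, if_pos]
        rw [List.take_succ_cons, List.take_succ_cons]
        congr 1
        cases j with
        | zero => simp
        | succ m =>
          rw [List.take_succ_cons, List.take_succ_cons, List.take_take]
          simp
      · simp only [h, if_neg, Bool.false_eq_true, not_false_iff]
        rw [List.take_succ_cons, List.take_succ_cons]
        congr 1
        exact ih j

theorem stepP_take (k : Int) (hk : 0 ≤ k) (S : List (Int × Int)) (p : Int × Int) :
    stepPTGI k (S.take k.toNat) p =
      (PySem.List.insertBy (fun a b : Int × Int => decide (b.1 < a.1)) p S).take k.toNat := by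
  unfold stepPTGI
  set K := k.toNat with hK
  have hkK : k = (K : Int) := by omega
  have hlen : (PySem.List.insertBy (fun a b : Int × Int => decide (b.1 < a.1)) p (S.take K)).length
      = (S.take K).length + 1 := length_insertBy _ _ _
  by_cases h : k < ((PySem.List.insertBy (fun a b : Int × Int => decide (b.1 < a.1)) p (S.take K)).length : Int)
  · simp only [h, if_pos]
    have htk : (S.take K).length ≤ K := by
      rw [List.length_take]; exact Nat.min_le_left _ _
    have hlen2 : (S.take K).length = K := by
      rw [hlen, hkK] at h
      push_cast at h
      omega
    rw [List.dropLast_eq_take]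
    rw [hlen, hlen2]
    simp only [Nat.add_sub_cancel]
    exact (take_insertBy _ _ S K).symm
  · simp only [h, if_neg, not_false_iff]
    have hle : (PySem.List.insertBy (fun a b : Int × Int => decide (b.1 < a.1)) p (S.take K)).length ≤ K := by
      omega
    rw [← List.take_of_length_le hle]
    exact (take_insertBy _ _ S K).symm

theorem foldl_stepP_take (k : Int) (hk : 0 ≤ k) (m : List (Int × Int)) :
    ∀ (S : List (Int × Int)),
      m.foldl (stepPTGI k) (S.take k.toNat) =
      (m.foldl (fun acc p => PySem.List.insertBy (fun a b : Int × Int => decide (b.1 < a.1)) p acc) S).take k.toNat := by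
  induction m with
  | nil => intro S; rfl
  | cons p ps ih =>
    intro S
    simp only [List.foldl_cons]
    rw [stepP_take k hk S p]
    exact ih _

theorem fBTGI_key (ex : Option (List Int)) (x : String × Int) (p : Int × Int)
    (h : fBTGI ex x = some p) : p.1 = x.2 := by
  unfold fBTGI at h
  cases hg : PySem.Int.ofStr? x.1 with
  | none => rw [hg] at h; exact absurd h (by simp)
  | some g =>
    rw [hg] at h
    by_cases he : pvExcludedTGI ex g = true
    · simp [he] at h
    · simp [he] at h; rw [← h]

theorem pairwise_insertA (x : String × Int) (acc : List (String × Int))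
    (hp : acc.Pairwise (fun a b => b.2 ≤ a.2)) :
    (PySem.List.insertBy (fun a b : String × Int => decide (b.2 < a.2)) x acc).Pairwise
      (fun a b => b.2 ≤ a.2) := by
  induction acc with
  | nil => simp [insertBy_nil]
  | cons y ys ih =>
    rw [insertBy_cons]
    rcases List.pairwise_cons.mp hp with ⟨hy, hys⟩
    by_cases h : y.2 < x.2
    · simp only [h, decide_true, if_pos]
      refine List.pairwise_cons.mpr ⟨?_, hp⟩
      intro z hz
      rcases List.mem_cons.mp hz with rfl | hz'
      · omega
      · have := hy z hz'; omega
    · simp only [h, decide_false, Bool.false_eq_true, if_neg, not_false_iff]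
      refine List.pairwise_cons.mpr ⟨?_, ih hys⟩
      intro z hz
      have hmem := (PySem.List.mem_insertBy (before := fun a b : String × Int => decide (b.2 < a.2)) (x := x) (ys := ys) (y := z)).mp hz
      rcases hmem with rfl | hz'
      · omega
      · exact hy z hz'

theorem filterMap_insertA (ex : Option (List Int)) (x : String × Int) (acc : List (String × Int))
    (hp : acc.Pairwise (fun a b => b.2 ≤ a.2)) :
    (PySem.List.insertBy (fun a b : String × Int => decide (b.2 < a.2)) x acc).filterMap (fBTGI ex) =
      match fBTGI ex x with
      | none => acc.filterMap (fBTGI ex)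
      | some p => PySem.List.insertBy (fun a b : Int × Int => decide (b.1 < a.1)) p (acc.filterMap (fBTGI ex)) := by
  induction acc with
  | nil =>
    rw [insertBy_nil]
    cases hfb : fBTGI ex x <;> simp [List.filterMap_cons, hfb, insertBy_nil]
  | cons y ys ih =>
    rcases List.pairwise_cons.mp hp with ⟨hy, hys⟩
    rw [insertBy_cons]
    by_cases h : y.2 < x.2
    · simp only [h, decide_true, if_pos]
      cases hfb : fBTGI ex x with
      | none => simp [List.filterMap_cons, hfb]
      | some p =>
        have hpx : p.1 = x.2 := fBTGI_key ex x p hfb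
        rw [List.filterMap_cons, hfb]
        dsimp only
        -- p must go at the head of filterMap (y :: ys): every kept key is ≤ y.2 < x.2
        have hhead : ∀ q ∈ (y :: ys).filterMap (fBTGI ex), q.1 < p.1 := by
          intro q hq
          rcases List.mem_filterMap.mp hq with ⟨z, hz, hfz⟩
          have hqz : q.1 = z.2 := fBTGI_key ex z q hfz
          rcases List.mem_cons.mp hz with rfl | hz'
          · omega
          · have := hy z hz'; omega
        cases hfl : (y :: ys).filterMap (fBTGI ex) with
        | nil => rw [insertBy_nil]
        | cons q qs =>
          rw [insertBy_cons]
          have hq1 : q.1 < p.1 := hhead q (hfl ▸ List.mem_cons_self)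
          simp [hq1]
    · simp only [h, decide_false, Bool.false_eq_true, if_neg, not_false_iff]
      cases hfy : fBTGI ex y with
      | none =>
        rw [List.filterMap_cons, hfy, List.filterMap_cons, hfy]
        dsimp only
        exact ih hys
      | some q =>
        have hqy : q.1 = y.2 := fBTGI_key ex y q hfy
        rw [List.filterMap_cons, hfy, List.filterMap_cons, hfy]
        dsimp only
        rw [ih hys]
        cases hfb : fBTGI ex x with
        | none => dsimp only
        | some p =>
          have hpx : p.1 = x.2 := fBTGI_key ex x p hfb
          dsimp only
          rw [insertBy_cons]
          have hnq : ¬ (q.1 < p.1) := by omega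
          simp [hnq]

theorem filterMap_foldl_insertA (ex : Option (List Int)) (s : List (String × Int)) :
    ∀ (acc : List (String × Int)), acc.Pairwise (fun a b => b.2 ≤ a.2) →
      (s.foldl (fun ac x => PySem.List.insertBy (fun a b : String × Int => decide (b.2 < a.2)) x ac) acc).filterMap (fBTGI ex) =
      (s.filterMap (fBTGI ex)).foldl
        (fun ac p => PySem.List.insertBy (fun a b : Int × Int => decide (b.1 < a.1)) p ac)
        (acc.filterMap (fBTGI ex)) := by
  induction s with
  | nil => intro acc _; rfl
  | cons x xs ih =>
    intro acc hp
    simp only [List.foldl_cons, List.filterMap_cons]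
    have hp' := pairwise_insertA x acc hp
    cases hfb : fBTGI ex x with
    | none =>
      rw [ih _ hp', filterMap_insertA ex x acc hp, hfb]
    | some p =>
      rw [ih _ hp', filterMap_insertA ex x acc hp, hfb]
      simp only [List.foldl_cons]

theorem fA_eq_map (ex : Option (List Int)) (x : String × Int) :
    fATGI ex x = (fBTGI ex x).map (fun p => p.2) := by
  unfold fATGI fBTGI
  cases PySem.Int.ofStr? x.1 with
  | none => rfl
  | some g =>
    by_cases h : pvExcludedTGI ex g = true <;> simp [h]

theorem goTGI_take (k : Int) (ex : Option (List Int)) (l : List (String × Int)) :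
    ∀ out : List Int, (out.length : Int) < k →
      goTGI k ex l out = out ++ ((l.filterMap (fATGI ex)).take (k.toNat - out.length)) := by
  induction l with
  | nil =>
    intro out _
    simp only [List.filterMap_nil, List.take_nil, List.append_nil]
    rfl
  | cons x rest ih =>
    intro out hlt
    obtain ⟨gid, score⟩ := x
    simp only [goTGI, List.filterMap_cons]
    cases hg : PySem.Int.ofStr? gid with
    | none =>
      simp only [fATGI, hg]
      exact ih out hlt
    | some g =>
      by_cases he : pvExcludedTGI ex g = true
      · simp only [he, if_pos, fATGI, hg]
        simpa [he] using ih out hlt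
      · simp only [he, if_neg, Bool.false_eq_true, not_false_iff, fATGI, hg]
        by_cases hbr : k ≤ ((out ++ [g]).length : Int)
        · simp only [hbr, if_pos]
          have h1 : k.toNat - out.length = 1 := by
            simp only [List.length_append, List.length_cons, List.length_nil] at hbr ⊢
            omega
          rw [h1]
          simp
        · simp only [hbr, if_neg, not_false_iff]
          rw [ih (out ++ [g]) (by simp only [List.length_append, List.length_cons, List.length_nil] at hbr ⊢; push_cast; push_cast at hbr; omega)]
          have h2 : k.toNat - out.length = (k.toNat - (out ++ [g]).length) + 1 := by
            simp only [List.length_append, List.length_cons, List.length_nil] at hbr ⊢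
            omega
          rw [h2, List.take_succ_cons]
          simp only [List.append_assoc, List.singleton_append, List.length_append,
            List.length_cons, List.length_nil]
          rfl

theorem goTGI_nonpos (k : Int) (ex : Option (List Int)) (hk : k ≤ 0) (l : List (String × Int)) :
    ∀ out : List Int, goTGI k ex l out = out ++ ((l.filterMap (fATGI ex)).take 1) := by
  induction l with
  | nil =>
    intro out
    simp only [List.filterMap_nil, List.take_nil, List.append_nil]
    rfl
  | cons x rest ih =>
    intro out
    obtain ⟨gid, score⟩ := x
    simp only [goTGI, List.filterMap_cons]
    cases hg : PySem.Int.ofStr? gid with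
    | none =>
      simp only [fATGI, hg]
      exact ih out
    | some g =>
      by_cases he : pvExcludedTGI ex g = true
      · simp only [he, if_pos, fATGI, hg]
        simpa [he] using ih out
      · simp only [he, if_neg, Bool.false_eq_true, not_false_iff, fATGI, hg]
        have hbr : k ≤ (out.length : Int) + 1 := by omega
        simp [hbr]

theorem bFold_nonpos (k : Int) (ex : Option (List Int)) (hk : k ≤ 0) (s : List (String × Int)) :
    s.foldl (bStepTGI k ex) [] = [] := by
  induction s with
  | nil => rfl
  | cons x xs ih =>
    simp only [List.foldl_cons]
    have : bStepTGI k ex [] x = [] := by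
      unfold bStepTGI
      cases PySem.Int.ofStr? x.1 with
      | none => rfl
      | some g =>
        by_cases he : pvExcludedTGI ex g = true
        · simp [he]
        · simp only [he, if_neg, Bool.false_eq_true, not_false_iff]
          have h1 : k < (1 : Int) := by omega
          simp [bInsertTGI, h1]
    rw [this, ih]

theorem exclD_eq (ex : Option (List Int)) (g : Int) :
    (ex.getD []).contains g = pvExcludedTGI ex g := by
  cases ex with
  | none => rfl
  | some l =>
    cases l with
    | nil => rfl
    | cons a l' => simp [pvExcludedTGI]

-- the condition tested inside D_'s `any` is exactly "fATGI keeps this item"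
theorem D_cond_eq (ex : Option (List Int)) (x : String × Int) :
    (match PySem.Int.ofStr? x.1 with
      | none => false
      | some g => !((ex.getD []).contains g)) = (fATGI ex x).isSome := by
  unfold fATGI
  cases PySem.Int.ofStr? x.1 with
  | none => rfl
  | some g =>
    dsimp only
    rw [exclD_eq]
    by_cases he : pvExcludedTGI ex g = true <;> simp [he]

-- common reduction of B on a truthy dict with 0 ≤ k
theorem alt_closed (s : List (String × Int)) (k : Int) (ex : Option (List Int))
    (hs : ¬ s.isEmpty = true) (hk : 0 ≤ k) :
    top_genre_ids_py_alt (some s) k ex =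
      (((s.filterMap (fBTGI ex)).foldl
        (fun ac p => PySem.List.insertBy (fun a b : Int × Int => decide (b.1 < a.1)) p ac)
        []).take k.toNat).map (fun p => p.2) := by
  unfold top_genre_ids_py_alt
  simp only [hs, if_neg, not_false_iff]
  rw [foldl_bStep]
  have h0 : ([] : List (Int × Int)) = ([] : List (Int × Int)).take k.toNat := by simp
  rw [h0, foldl_stepP_take k hk]
  simp

-- common reduction of A on a truthy dict: filterMap through the stable sort
theorem A_filterMap_sorted (s : List (String × Int)) (ex : Option (List Int)) :
    (PySem.List.sorted s (fun x => x.2) true).filterMap (fBTGI ex) =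
      (s.filterMap (fBTGI ex)).foldl
        (fun ac p => PySem.List.insertBy (fun a b : Int × Int => decide (b.1 < a.1)) p ac) [] := by
  rw [PySem.List.sorted_rev_eq_foldl_insertBy]
  simpa using filterMap_foldl_insertA ex s [] List.Pairwise.nil

-- ===== VERDICT (by name: the statement is the Claim_ definition above) =====
theorem top_genre_ids_py_spec : Claim_unchanged_top_genre_ids_py := by
  intro scores k ex _hDom
  intro hnD
  cases scores with
  | none => rfl
  | some s =>
    by_cases hs : s.isEmpty = true
    · unfold top_genre_ids_py top_genre_ids_py_alt
      simp [hs]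
    · by_cases hk : k ≤ 0
      · -- outside D_ with k ≤ 0: no parsable non-excluded id exists, both return []
        have hsne : s ≠ [] := by
          intro h; rw [h] at hs; exact hs rfl
        have hany : ¬ (s.any (fun x =>
            match PySem.Int.ofStr? x.1 with
            | none => false
            | some g => !((ex.getD []).contains g)) = true) := by
          intro h
          exact hnD ⟨hk, by simpa using hsne, by simpa using h⟩
        have hnone : ∀ x ∈ s, fATGI ex x = none := by
          intro x hx
          have := fun h => hany (List.any_eq_true.mpr ⟨x, hx, h⟩)
          rw [D_cond_eq] at this
          cases hfa : fATGI ex x with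
          | none => rfl
          | some g => exact absurd (by rw [hfa]; rfl) this
        have hfmA : (PySem.List.sorted s (fun x => x.2) true).filterMap (fATGI ex) = [] := by
          rw [List.filterMap_eq_nil_iff]
          intro x hx
          exact hnone x ((PySem.List.mem_sorted _ _ _ _).mp hx)
        unfold top_genre_ids_py top_genre_ids_py_alt
        simp only [hs, if_neg, Bool.false_eq_true, not_false_iff]
        rw [goTGI_nonpos k ex hk _ [], hfmA, bFold_nonpos k ex hk]
        simp
      · -- k ≥ 1: both are map-snd of the first k of the stable descending sort of the kept pairs
        push_neg at hk
        have hk0 : 0 ≤ k := by omega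
        unfold top_genre_ids_py
        simp only [hs, if_neg, Bool.false_eq_true, not_false_iff]
        rw [goTGI_take k ex _ [] (by simpa using hk)]
        rw [alt_closed s k ex hs hk0]
        have hfa : (PySem.List.sorted s (fun x => x.2) true).filterMap (fATGI ex) =
            ((PySem.List.sorted s (fun x => x.2) true).filterMap (fBTGI ex)).map (fun p => p.2) := by
          rw [List.map_filterMap]
          exact List.filterMap_congr (fun x _ => fA_eq_map ex x)
        rw [hfa, A_filterMap_sorted s ex]
        simp [List.map_take]

theorem top_genre_ids_py_changed : Claim_changed_top_genre_ids_py := by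
  unfold Claim_changed_top_genre_ids_py; decide

theorem top_genre_ids_py_tight : Claim_exact_top_genre_ids_py := by
  intro scores k ex _hDom hD
  rcases hD with ⟨hk, hne, hany⟩
  cases scores with
  | none => simp at hne
  | some s =>
    simp only [Option.getD_some] at hne hany
    have hs : ¬ s.isEmpty = true := by simpa using hne
    -- A is nonempty: some item is kept, so the sorted list has a kept item
    rcases List.any_eq_true.mp hany with ⟨x, hx, hcx⟩
    have hfx : (fATGI ex x).isSome := by rw [← D_cond_eq]; exact hcx
    have hmem : x ∈ PySem.List.sorted s (fun x => x.2) true := (PySem.List.mem_sorted _ _ _ _).mpr hx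
    have hfmA : (PySem.List.sorted s (fun x => x.2) true).filterMap (fATGI ex) ≠ [] := by
      intro h
      rw [List.filterMap_eq_nil_iff] at h
      rw [h x hmem] at hfx
      simp at hfx
    unfold top_genre_ids_py top_genre_ids_py_alt
    simp only [hs, if_neg, Bool.false_eq_true, not_false_iff]
    rw [goTGI_nonpos k ex hk _ [], bFold_nonpos k ex hk]
    cases hfl : (PySem.List.sorted s (fun x => x.2) true).filterMap (fATGI ex) with
    | nil => exact absurd hfl hfmA
    | cons q qs => simp
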